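-- pv_equiv track=rewrite | github.com/rl-institut/WEFEConfigurator | app/survey/survey.py | get_survey_question_by_id
-- ===== SOURCE A (Python) =====
-- def get_survey_question_by_id(survey_questions, question_id):
--     answer = None
--     for q in survey_questions:
--         if q["question_id"] == question_id:
--             if answer is None:
--                 answer = q
--             else:
--                 msg = f"Question number {question_id} appears multiple times"
--                 raise KeyError(msg)
--     return answer
-- ===== SOURCE B (Python) =====
-- def get_survey_question_by_id(survey_questions, question_id):
--     # Divide and conquer: the unique match in a range is the match of either half;
--     # two matches (one in each half, or deeper) mean a duplicate id.
--     def solve(lo, hi):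
--         if hi - lo == 0:
--             return None
--         if hi - lo == 1:
--             q = survey_questions[lo]
--             return q if q["question_id"] == question_id else None
--         mid = (lo + hi) // 2
--         left = solve(lo, mid)
--         right = solve(mid, hi)
--         if left is not None and right is not None:
--             raise KeyError(f"Question number {question_id} appears multiple times")
--         return left if left is not None else right
--     return solve(0, len(survey_questions))
-- ===== Notes on version B (the rewrite author's own statement) =====
-- stated objective: alternative
-- what changed: Replaces the linear accumulator-and-raise scan with a divide-and-conquer over index ranges: recursively find the unique match in each half and combine, raising the same KeyError when both halves yield a match.
import Mathlib
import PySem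

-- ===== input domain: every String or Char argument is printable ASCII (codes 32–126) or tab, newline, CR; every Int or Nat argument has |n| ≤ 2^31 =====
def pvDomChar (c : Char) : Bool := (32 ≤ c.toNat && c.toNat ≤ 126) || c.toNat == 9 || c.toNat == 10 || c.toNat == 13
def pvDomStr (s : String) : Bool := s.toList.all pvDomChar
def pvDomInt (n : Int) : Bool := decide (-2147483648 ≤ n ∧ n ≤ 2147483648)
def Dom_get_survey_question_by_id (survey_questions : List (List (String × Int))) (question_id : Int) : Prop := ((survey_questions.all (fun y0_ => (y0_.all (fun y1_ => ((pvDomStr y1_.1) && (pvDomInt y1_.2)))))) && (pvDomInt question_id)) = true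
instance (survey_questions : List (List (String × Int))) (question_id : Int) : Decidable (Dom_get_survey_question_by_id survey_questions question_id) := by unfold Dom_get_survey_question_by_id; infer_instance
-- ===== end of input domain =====

-- B replaces A's linear accumulator-and-raise scan with a divide-and-conquer over index
-- ranges (find the unique match in each half, combine); objective: alternative.


-- q["question_id"] : dict lookup on the association list (first match); none = KeyError
def pvGetQid (q : List (String × Int)) : Option Int :=
  (q.find? (fun kv => kv.1 == "question_id")).map (·.2)

-- ===== PORT A =====
-- the for-loop with the 'answer' accumulator; a raise (missing key / duplicate) is outside Pre_ and ported as none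
def pvLoopA (survey_questions : List (List (String × Int))) (question_id : Int)
    (answer : Option (List (String × Int))) : Option (List (String × Int)) :=
  match survey_questions with
  | [] => answer
  | q :: rest =>
    match pvGetQid q with
    | none => none   -- KeyError on q["question_id"], excluded by Pre_
    | some v =>
      if v = question_id then
        match answer with
        | none => pvLoopA rest question_id (some q)
        | some _ => none   -- raise KeyError (duplicate), excluded by Pre_
      else
        pvLoopA rest question_id answer

def get_survey_question_by_id (survey_questions : List (List (String × Int))) (question_id : Int) : Option (List (String × Int)) :=
  pvLoopA survey_questions question_id none

-- ===== PORT B =====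
-- the inner 'solve(lo, hi)' of Source B; the first guard is '≤ 0' instead of '= 0' only to make
-- the recursion total (Source B never calls solve with hi < lo); raises are none, as in port A
def pvSolveB (survey_questions : List (List (String × Int))) (question_id : Int)
    (lo hi : Int) : Option (List (String × Int)) :=
  if hle : hi - lo ≤ 0 then none
  else if h1 : hi - lo = 1 then
    match PySem.List.pyGet? survey_questions lo with
    | none => none   -- IndexError, unreachable from Source B's calls
    | some q =>
      match pvGetQid q with
      | none => none   -- KeyError on q["question_id"], excluded by Pre_
      | some v => if v = question_id then some q else none
  else
    let mid := PySem.Int.floordiv (lo + hi) 2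
    let left := pvSolveB survey_questions question_id lo mid
    let right := pvSolveB survey_questions question_id mid hi
    if left.isSome && right.isSome then none   -- raise KeyError (duplicate), excluded by Pre_
    else if left.isSome then left else right
termination_by (hi - lo).toNat
decreasing_by
  all_goals
    simp only [PySem.Int.floordiv_eq_ediv_of_pos (by omega : (0:Int) < 2)]
    omega

def get_survey_question_by_id_alt (survey_questions : List (List (String × Int))) (question_id : Int) : Option (List (String × Int)) :=
  pvSolveB survey_questions question_id 0 survey_questions.length

-- ===== PRECONDITION & SPEC =====
-- Pre_ excludes exactly the inputs where A raises KeyError: some question lacks the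
-- "question_id" key, or more than one question carries the requested id.
def Pre_get_survey_question_by_id (survey_questions : List (List (String × Int))) (question_id : Int) : Prop :=
  (∀ q ∈ survey_questions, (pvGetQid q).isSome) ∧
  (survey_questions.countP (fun q => pvGetQid q == some question_id)) ≤ 1
instance (survey_questions : List (List (String × Int))) (question_id : Int) : Decidable (Pre_get_survey_question_by_id survey_questions question_id) := by unfold Pre_get_survey_question_by_id; infer_instance

def pvWitness_get_survey_question_by_id : (List (List (String × Int))) × Int :=
  ([[("question_id", 1), ("x", 2)], [("question_id", 2)]], 1)

def Spec_get_survey_question_by_id (survey_questions : List (List (String × Int))) (question_id : Int) (out : Option (List (String × Int))) : Prop := out = get_survey_question_by_id_alt survey_questions question_id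
instance (survey_questions : List (List (String × Int))) (question_id : Int) (out : Option (List (String × Int))) : Decidable (Spec_get_survey_question_by_id survey_questions question_id out) := by unfold Spec_get_survey_question_by_id; infer_instance

-- ===== CLAIM (what is proved, stated in full; the proofs are below) =====
def Claim_equal_get_survey_question_by_id : Prop := ∀ (survey_questions : List (List (String × Int))) (question_id : Int), Dom_get_survey_question_by_id survey_questions question_id → Pre_get_survey_question_by_id survey_questions question_id → Spec_get_survey_question_by_id survey_questions question_id (get_survey_question_by_id survey_questions question_id)

-- ===== LEMMAS AND PROOFS =====

-- once 'answer' is set and no further match exists, A's loop returns it unchanged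
theorem pvLoopA_some_of_count_zero (qs : List (List (String × Int))) (qid : Int)
    (a : List (String × Int))
    (hk : ∀ q ∈ qs, (pvGetQid q).isSome)
    (hc : qs.countP (fun q => pvGetQid q == some qid) = 0) :
    pvLoopA qs qid (some a) = some a := by
  induction qs with
  | nil => rfl
  | cons q rest ih =>
    have hq := hk q (by simp)
    obtain ⟨v, hv⟩ := Option.isSome_iff_exists.mp hq
    rw [List.countP_cons] at hc
    simp [pvLoopA, hv]
    have hne : v ≠ qid := by
      intro h; subst h; simp [hv] at hc
    simp [hne]
    exact ih (fun q hq => hk q (by simp [hq])) (by omega)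

-- A's loop invariant: with answer = none and at most one match, the loop returns the first match
theorem pvLoopA_none_eq (qs : List (List (String × Int))) (qid : Int)
    (hk : ∀ q ∈ qs, (pvGetQid q).isSome)
    (hc : qs.countP (fun q => pvGetQid q == some qid) ≤ 1) :
    pvLoopA qs qid none = (qs.filter (fun q => pvGetQid q == some qid)).head? := by
  induction qs with
  | nil => rfl
  | cons q rest ih =>
    have hq := hk q (by simp)
    obtain ⟨v, hv⟩ := Option.isSome_iff_exists.mp hq
    rw [List.countP_cons] at hc
    by_cases h : v = qid
    · have hmatch : (pvGetQid q == some qid) = true := by simp [hv, h]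
      rw [hmatch] at hc
      rw [if_pos rfl] at hc
      have hc0 : rest.countP (fun q => pvGetQid q == some qid) = 0 := by omega
      simp only [List.filter_cons, hmatch, if_true, List.head?_cons]
      simp only [pvLoopA, hv]
      rw [if_pos h]
      exact pvLoopA_some_of_count_zero rest qid q (fun q hq => hk q (by simp [hq])) hc0
    · have hb : (pvGetQid q == some qid) = false := by simp [hv, h]
      simp only [List.filter_cons, hb, Bool.false_eq_true, if_false]
      simp only [pvLoopA, hv]
      rw [if_neg h]
      exact ih (fun q hq => hk q (by simp [hq])) (by omega)

-- B's divide and conquer returns the first match of the slice [lo:hi], given keys present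
-- and at most one match in the slice
theorem pvSolveB_eq_filter_head (qs : List (List (String × Int))) (qid : Int) :
    ∀ (n : Nat) (lo hi : Int), (hi - lo).toNat = n → 0 ≤ lo → lo ≤ hi → hi ≤ qs.length →
    (∀ q ∈ qs, (pvGetQid q).isSome) →
    ((qs.drop lo.toNat).take (hi - lo).toNat).countP (fun q => pvGetQid q == some qid) ≤ 1 →
    pvSolveB qs qid lo hi =
      (((qs.drop lo.toNat).take (hi - lo).toNat).filter (fun q => pvGetQid q == some qid)).head? := by
  intro n
  induction n using Nat.strong_induction_on with
  | _ n ih =>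
    intro lo hi hn h0 hlh hh hk hc
    by_cases hle : hi - lo ≤ 0
    · have : (hi - lo).toNat = 0 := by omega
      rw [pvSolveB, dif_pos hle, this]
      simp
    · by_cases h1 : hi - lo = 1
      · have hlt : lo.toNat < qs.length := by omega
        have hget : PySem.List.pyGet? qs lo = some qs[lo.toNat] :=
          PySem.List.pyGet?_eq_some_getElem qs h0 (by omega)
        obtain ⟨v, hv⟩ := Option.isSome_iff_exists.mp
          (hk qs[lo.toNat] (List.getElem_mem hlt))
        rw [pvSolveB, dif_neg hle, dif_pos h1, hget, h1,
          show ((1:Int)).toNat = 1 from rfl,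
          List.drop_eq_getElem_cons hlt, List.take_succ_cons, List.take_zero]
        by_cases heq : v = qid
        · simp [hv, heq]
        · simp [hv, heq]
      · -- recursive case: hi - lo ≥ 2
        have h2 : 2 ≤ hi - lo := by omega
        set mid := PySem.Int.floordiv (lo + hi) 2 with hmid
        have hmb : lo + 1 ≤ mid ∧ mid + 1 ≤ hi := by
          rw [hmid, PySem.Int.floordiv_eq_ediv_of_pos (by omega : (0:Int) < 2)]
          omega
        -- the slice splits at mid
        have hsplit : (qs.drop lo.toNat).take (hi - lo).toNat =
            (qs.drop lo.toNat).take (mid - lo).toNat ++ (qs.drop mid.toNat).take (hi - mid).toNat := by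
          have e1 : (hi - lo).toNat = (mid - lo).toNat + (hi - mid).toNat := by omega
          have e2 : qs.drop mid.toNat = (qs.drop lo.toNat).drop (mid - lo).toNat := by
            rw [List.drop_drop]
            congr 1
            omega
          rw [e1, List.take_add, e2]
        rw [hsplit, List.countP_append] at hc
        have ihl := ih (mid - lo).toNat (by omega) lo mid rfl h0 (by omega) (by omega) hk (by omega)
        have ihr := ih (hi - mid).toNat (by omega) mid hi rfl (by omega) (by omega) hh hk (by omega)
        rw [pvSolveB, dif_neg hle, dif_neg h1]
        simp only [← hmid, ihl, ihr, hsplit, List.filter_append, List.head?_append]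
        -- case on whether the left half has a match
        cases hfl : ((qs.drop lo.toNat).take (mid - lo).toNat).filter
            (fun q => pvGetQid q == some qid) with
        | nil => simp
        | cons m tl =>
          have hcl : 1 ≤ ((qs.drop lo.toNat).take (mid - lo).toNat).countP
              (fun q => pvGetQid q == some qid) := by
            rw [List.countP_eq_length_filter, hfl]; simp
          have hcr : ((qs.drop mid.toNat).take (hi - mid).toNat).countP
              (fun q => pvGetQid q == some qid) = 0 := by omega
          have hfr : ((qs.drop mid.toNat).take (hi - mid).toNat).filter
              (fun q => pvGetQid q == some qid) = [] := by
            rw [List.countP_eq_length_filter] at hcr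
            exact List.eq_nil_of_length_eq_zero hcr
          simp [hfr]

-- ===== VERDICT (by name: the statement is the Claim_ definition above) =====
theorem get_survey_question_by_id_spec : Claim_equal_get_survey_question_by_id := by
  intro qs qid _ hpre
  obtain ⟨hk, hc⟩ := hpre
  unfold Spec_get_survey_question_by_id get_survey_question_by_id get_survey_question_by_id_alt
  have hwhole : (qs.drop (0:Int).toNat).take (((qs.length : Int) - 0)).toNat = qs := by
    simp
  rw [pvLoopA_none_eq qs qid hk hc,
    pvSolveB_eq_filter_head qs qid ((qs.length : Int) - 0).toNat 0 qs.length rfl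
      (by omega) (by omega) (by omega) hk (by rw [hwhole]; exact hc),
    hwhole]
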